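-- pv_equiv track=rewrite | github.com/fatjan/practice-code | python/doctors.py | solution
-- ===== SOURCE A (Python) =====
-- def solution(A, B, S):
--     # Implement your solution here
--     if len(A) > S:
--         return False
--
--     stack = []
--     result = []
--     for i in range(len(A)):
--         slot = A[i]
--         room = B[i]
--         if slot not in stack:
--             stack.append(slot)
--         else:
--             index = stack.index(slot)
--             take = stack.pop(index)
--             if take in result:
--                 return False
--             result.append(take)
--
--
--         if room not in stack:
--             stack.append(room)
--         else:
--             index = stack.index(room)
--             take = stack.pop(index)
--             if take in result:
--                 return False
--             result.append(take)
--
--     for num in stack: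
--         if num not in result:
--             result.append(num)
--             if len(result) == len(A):
--                 break
--     if len(result) == len(A):
--         return True
--
--     return False
-- ===== SOURCE B (Python) =====
-- def solution(A, B, S):
--     if len(A) > S:
--         return False
--     counts = {}
--     for i in range(len(A)):
--         for v in (A[i], B[i]):
--             c = counts.get(v, 0) + 1
--             if c == 4:
--                 return False
--             counts[v] = c
--     return len(counts) >= len(A)
-- ===== Notes on version B (the rewrite author's own statement) =====
-- stated objective: simpler
-- what changed: Replaces A's stack/result toggle simulation (with list membership tests, index/pop and a final refill loop) by a single pass that counts occurrences of each value in a dict, returning False when any count reaches 4 and finally comparing the number of distinct values with len(A).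
-- outside the precondition, e.g. on solution([1, 1, 1, 1], [1, 1], 10): A returns False, B returns False
import Mathlib
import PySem

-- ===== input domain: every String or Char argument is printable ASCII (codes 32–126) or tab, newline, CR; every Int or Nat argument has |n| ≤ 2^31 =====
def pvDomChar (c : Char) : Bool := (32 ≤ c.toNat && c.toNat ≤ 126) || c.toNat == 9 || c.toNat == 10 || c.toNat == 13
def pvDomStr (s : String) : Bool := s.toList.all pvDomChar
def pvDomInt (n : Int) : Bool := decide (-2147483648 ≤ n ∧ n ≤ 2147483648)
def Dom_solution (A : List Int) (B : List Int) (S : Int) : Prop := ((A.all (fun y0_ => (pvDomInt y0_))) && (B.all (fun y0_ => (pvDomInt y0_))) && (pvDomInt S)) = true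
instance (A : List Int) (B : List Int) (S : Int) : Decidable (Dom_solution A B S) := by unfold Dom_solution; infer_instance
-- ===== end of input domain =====

-- B replaces A's stack/result pairing simulation by a single occurrence-counting pass over
-- the same A[i], B[i] values (fail when a count reaches 4, then compare the number of
-- distinct values with len(A)); objective: simpler.

-- ===== PORT A =====
-- one toggle step of A's loop body (the identical code A runs for `slot` and for `room`);
-- `none` = the Python `return False` inside the loop
def solAStep (stack result : List Int) (v : Int) : Option (List Int × List Int) :=
  if !(stack.contains v) then some (stack ++ [v], result)
  else
    -- index = stack.index(v); take, rest = stack[index], stack with it popped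
    match PySem.List.pop? stack (((PySem.List.index? stack v).getD 0 : Nat) : Int) with
    | none => none   -- unreachable: the index is a valid position of v in stack
    | some (take, stack') =>
      if result.contains take then none
      else some (stack', result ++ [take])

-- the `for i in range(len(A))` loop
def solALoop (A B : List Int) : List Int → List Int → List Int → Option (List Int × List Int)
  | [], stack, result => some (stack, result)
  | i :: rest, stack, result =>
    match solAStep stack result (PySem.List.pyGetD A i 0) with   -- slot = A[i]
    | none => none
    | some (s1, r1) =>
      match solAStep s1 r1 (PySem.List.pyGetD B i 0) with        -- room = B[i]; in range under Pre_
      | none => none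
      | some (s2, r2) => solALoop A B rest s2 r2

-- the final `for num in stack` refill loop with its `break` at len(result) == len(A)
def solAFill (n : Nat) : List Int → List Int → List Int
  | [], result => result
  | num :: rest, result =>
    if result.contains num then solAFill n rest result
    else
      let result' := result ++ [num]
      if result'.length = n then result' else solAFill n rest result'

def solution (A : List Int) (B : List Int) (S : Int) : Bool :=
  if (A.length : Int) > S then false
  else
    match solALoop A B (PySem.List.pyRange 0 (A.length : Int) 1) [] [] with
    | none => false
    | some (stack, result) => decide ((solAFill A.length stack result).length = A.length)

-- ===== PORT B =====
-- Source B's counting loop; `none` = the `return False` on a count reaching 4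
def solBLoop (A B : List Int) : List Int → PySem.Dict Int Int → Option (PySem.Dict Int Int)
  | [], counts => some counts
  | i :: rest, counts =>
    let c1 := counts.getD (PySem.List.pyGetD A i 0) 0 + 1
    if c1 = 4 then none
    else
      let counts1 := counts.insert (PySem.List.pyGetD A i 0) c1
      let c2 := counts1.getD (PySem.List.pyGetD B i 0) 0 + 1
      if c2 = 4 then none
      else solBLoop A B rest (counts1.insert (PySem.List.pyGetD B i 0) c2)

def solution_alt (A : List Int) (B : List Int) (S : Int) : Bool :=
  if (A.length : Int) > S then false
  else
    match solBLoop A B (PySem.List.pyRange 0 (A.length : Int) 1) PySem.Dict.empty with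
    | none => false
    | some counts => decide (A.length ≤ counts.size)

-- ===== PRECONDITION & SPEC =====
-- Pre_ excludes inputs with len(B) < len(A) ≤ S, on which A's loop reads B[i] past the end
-- and usually raises IndexError (on some of them a count-of-4 early return fires first and
-- both programs return False; the raise point is data-dependent and not closed-form).
def Pre_solution (A : List Int) (B : List Int) (S : Int) : Prop :=
  (S < (A.length : Int)) ∨ A.length ≤ B.length
instance (A : List Int) (B : List Int) (S : Int) : Decidable (Pre_solution A B S) := by
  unfold Pre_solution; infer_instance

def pvWitness_solution : List Int × List Int × Int := ([1, 2, 1], [2, 3, 4], 5)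

def Spec_solution (A : List Int) (B : List Int) (S : Int) (out : Bool) : Prop := out = solution_alt A B S
instance (A : List Int) (B : List Int) (S : Int) (out : Bool) : Decidable (Spec_solution A B S out) := by unfold Spec_solution; infer_instance

-- ===== CLAIM (what is proved, stated in full; the proofs are below) =====
def Claim_equal_solution : Prop := ∀ (A : List Int) (B : List Int) (S : Int), Dom_solution A B S → Pre_solution A B S → Spec_solution A B S (solution A B S)

-- ===== LEMMAS AND PROOFS =====

-- Invariant tying A's (stack, result) to B's counts after m processed values:
-- counts c = d.getD v 0 satisfies 0 ≤ c ≤ 3, stack holds exactly the odd-count values,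
-- result exactly the values with c ∈ {2, 3}, the dict keys exactly the seen values,
-- and 2·|result| + |stack| ≤ m.
def PvInv (stack result : List Int) (d : PySem.Dict Int Int) (m : Nat) : Prop :=
  stack.Nodup ∧ result.Nodup ∧ d.keys.Nodup ∧
  2 * result.length + stack.length ≤ m ∧
  ∀ v : Int,
    (0 ≤ d.getD v 0 ∧ d.getD v 0 ≤ 3) ∧
    (v ∈ stack ↔ (d.getD v 0 = 1 ∨ d.getD v 0 = 3)) ∧
    (v ∈ result ↔ (d.getD v 0 = 2 ∨ d.getD v 0 = 3)) ∧
    (v ∈ d.keys ↔ d.getD v 0 ≠ 0)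

-- A's pop-at-index of a member v is List.erase
lemma pop_index_of_mem (stack : List Int) (w : Int) (hw : w ∈ stack) :
    PySem.List.pop? stack (((PySem.List.index? stack w).getD 0 : Nat) : Int) = some (w, stack.erase w) := by
  obtain ⟨k, hk⟩ := Option.isSome_iff_exists.mp ((PySem.List.index?_isSome_iff stack w).mpr hw)
  obtain ⟨hklt, hkw, hprev⟩ := PySem.List.getElem_of_index?_eq_some hk
  have hidx : stack.idxOf w = k := by
    rw [List.idxOf_eq_getD_idxOf?, ← PySem.List.index?_eq_idxOf?, hk]; rfl
  rw [hk]
  simp only [Option.getD_some]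
  rw [PySem.List.pop?_natCast stack k hklt, hkw, List.erase_eq_eraseIdx_of_idxOf hidx]

-- one A-step vs one count increment: both fail exactly on a 4th occurrence,
-- and otherwise the invariant is preserved
lemma step_rel (stack result : List Int) (d : PySem.Dict Int Int) (m : Nat)
    (h : PvInv stack result d m) (w : Int) :
    (d.getD w 0 + 1 = 4 → solAStep stack result w = none) ∧
    (d.getD w 0 + 1 ≠ 4 → ∃ s' r', solAStep stack result w = some (s', r') ∧
      PvInv s' r' (d.insert w (d.getD w 0 + 1)) (m + 1)) := by
  obtain ⟨hsn, hrn, hkn, hlen, hv⟩ := h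
  obtain ⟨⟨hc0, hc3⟩, hst, hrs, hky⟩ := hv w
  constructor
  · intro h4
    have hc : d.getD w 0 = 3 := by omega
    have hw : w ∈ stack := hst.mpr (Or.inr hc)
    have hwr : w ∈ result := hrs.mpr (Or.inr hc)
    unfold solAStep
    rw [pop_index_of_mem stack w hw]
    simp [hw, hwr]
  · intro h4
    by_cases hw : w ∈ stack
    · -- pop case: count is 1
      have hc : d.getD w 0 = 1 := by rcases hst.mp hw with h | h <;> omega
      have hwr : w ∉ result := fun hmem => by rcases hrs.mp hmem with h | h <;> omega
      refine ⟨stack.erase w, result ++ [w], ?_, ?_, ?_, ?_, ?_, ?_⟩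
      · unfold solAStep
        rw [pop_index_of_mem stack w hw]
        simp [hw, hwr]
      · exact hsn.erase w
      · exact hrn.append (List.nodup_singleton _) (List.disjoint_singleton.mpr hwr)
      · exact PySem.Dict.nodup_keys_insert d w _ hkn
      · have h1 : (stack.erase w).length = stack.length - 1 := List.length_erase_of_mem hw
        have h2 : 0 < stack.length := List.length_pos_of_mem hw
        simp only [List.length_append, List.length_singleton, h1]
        omega
      · intro v
        by_cases hvw : v = w
        · subst hvw
          rw [PySem.Dict.getD_insert_self]
          refine ⟨by omega, ?_, ?_, ?_⟩
          · simp [hsn.mem_erase_iff]; omega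
          · simp; omega
          · rw [PySem.Dict.mem_keys_insert]; simp; omega
        · obtain ⟨⟨hc0', hc3'⟩, hst', hrs', hky'⟩ := hv v
          rw [PySem.Dict.getD_insert_of_ne d _ _ hvw]
          refine ⟨⟨hc0', hc3'⟩, ?_, ?_, ?_⟩
          · rw [hsn.mem_erase_iff]; simp [hvw, hst']
          · simp [List.mem_append, hvw, hrs']
          · rw [PySem.Dict.mem_keys_insert]; simp [hvw, hky']
    · -- push case: count is 0 or 2
      have hc : d.getD w 0 = 0 ∨ d.getD w 0 = 2 := by
        by_contra hcc
        push Not at hcc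
        exact hw (hst.mpr (by omega))
      refine ⟨stack ++ [w], result, ?_, ?_, ?_, ?_, ?_, ?_⟩
      · unfold solAStep
        simp [hw]
      · exact hsn.append (List.nodup_singleton _) (List.disjoint_singleton.mpr hw)
      · exact hrn
      · exact PySem.Dict.nodup_keys_insert d w _ hkn
      · simp only [List.length_append, List.length_singleton]; omega
      · intro v
        by_cases hvw : v = w
        · subst hvw
          rw [PySem.Dict.getD_insert_self]
          refine ⟨by omega, ?_, ?_, ?_⟩
          · simp; omega
          · rw [hrs]; omega
          · rw [PySem.Dict.mem_keys_insert]; simp; omega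
        · obtain ⟨⟨hc0', hc3'⟩, hst', hrs', hky'⟩ := hv v
          rw [PySem.Dict.getD_insert_of_ne d _ _ hvw]
          refine ⟨⟨hc0', hc3'⟩, ?_, ?_, ?_⟩
          · simp [List.mem_append, hvw, hst']
          · exact hrs'
          · rw [PySem.Dict.mem_keys_insert]; simp [hvw, hky']

-- the two loops fail together or succeed together with the invariant carried through
lemma loop_rel (A B : List Int) :
    ∀ (is_ : List Int) (stack result : List Int) (d : PySem.Dict Int Int) (m : Nat),
    PvInv stack result d m →
    (solALoop A B is_ stack result = none ∧ solBLoop A B is_ d = none) ∨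
    (∃ st rs d', solALoop A B is_ stack result = some (st, rs) ∧ solBLoop A B is_ d = some d' ∧
      PvInv st rs d' (m + 2 * is_.length)) := by
  intro is_
  induction is_ with
  | nil =>
    intro stack result d m h
    exact Or.inr ⟨stack, result, d, rfl, rfl, by simpa using h⟩
  | cons i rest ih =>
    intro stack result d m h
    obtain ⟨h4a, hoka⟩ := step_rel stack result d m h (PySem.List.pyGetD A i 0)
    by_cases hc1 : d.getD (PySem.List.pyGetD A i 0) 0 + 1 = 4
    · refine Or.inl ⟨?_, ?_⟩
      · simp only [solALoop, h4a hc1]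
      · simp only [solBLoop, if_pos hc1]
    · obtain ⟨s1, r1, hstep1, hinv1⟩ := hoka hc1
      obtain ⟨h4b, hokb⟩ := step_rel s1 r1 _ (m+1) hinv1 (PySem.List.pyGetD B i 0)
      by_cases hc2 : (d.insert (PySem.List.pyGetD A i 0) (d.getD (PySem.List.pyGetD A i 0) 0 + 1)).getD (PySem.List.pyGetD B i 0) 0 + 1 = 4
      · refine Or.inl ⟨?_, ?_⟩
        · simp only [solALoop, hstep1, h4b hc2]
        · simp only [solBLoop, if_neg hc1, if_pos hc2]
      · obtain ⟨s2, r2, hstep2, hinv2⟩ := hokb hc2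
        rcases ih s2 r2 _ (m+2) hinv2 with ⟨ha, hb⟩ | ⟨st, rs, d', ha, hb, hinv⟩
        · refine Or.inl ⟨?_, ?_⟩
          · simp only [solALoop, hstep1, hstep2]; exact ha
          · simp only [solBLoop, if_neg hc1, if_neg hc2]; exact hb
        · refine Or.inr ⟨st, rs, d', ?_, ?_, ?_⟩
          · simp only [solALoop, hstep1, hstep2]; exact ha
          · simp only [solBLoop, if_neg hc1, if_neg hc2]; exact hb
          · have : m + 2 + 2 * rest.length = m + 2 * (i :: rest).length := by
              simp [List.length_cons]; ring
            exact this ▸ hinv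

-- length of A's refill result: |result| grows by the stack values not yet in result, capped at n
lemma fill_len (n : Nat) :
    ∀ (st rs : List Int), st.Nodup → rs.length ≤ n →
    (rs.length = n → st.filter (fun v => !rs.contains v) = []) →
    (solAFill n st rs).length = min (rs.length + (st.filter (fun v => !rs.contains v)).length) n := by
  intro st
  induction st with
  | nil =>
    intro rs _ hle _
    simp only [solAFill, List.filter_nil, List.length_nil, Nat.add_zero]
    omega
  | cons num rest ih =>
    intro rs hnd hle hfull
    by_cases hmem : num ∈ rs
    · have hcont : rs.contains num = true := List.elem_eq_true_of_mem hmem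
      have hfilter : (num :: rest).filter (fun v => !rs.contains v) = rest.filter (fun v => !rs.contains v) := by
        simp [hmem]
      simp only [solAFill, hcont, if_true, hfilter]
      exact ih rs hnd.of_cons hle (fun h => by rw [← hfilter]; exact hfull h)
    · have hcont : rs.contains num = false := by
        simp only [List.contains_eq_mem, decide_eq_false_iff_not]
        exact hmem
      have hfilter : (num :: rest).filter (fun v => !rs.contains v) = num :: rest.filter (fun v => !rs.contains v) := by
        simp [hmem]
      have hlt : rs.length < n := by
        rcases Nat.lt_or_ge rs.length n with h | h
        · exact h
        · have heq : rs.length = n := by omega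
          have := hfull heq
          rw [hfilter] at this
          exact absurd this (by simp)
      simp only [solAFill, hcont, Bool.false_eq_true, if_false, hfilter]
      by_cases hn : (rs ++ [num]).length = n
      · rw [if_pos hn]
        simp only [List.length_append, List.length_singleton] at hn ⊢
        simp only [List.length_cons]
        omega
      · rw [if_neg hn]
        have hnum_rest : num ∉ rest := (List.nodup_cons.mp hnd).1
        have hfeq : rest.filter (fun v => !(rs ++ [num]).contains v) = rest.filter (fun v => !rs.contains v) := by
          apply List.filter_congr
          intro v hvmem
          have hvne : v ≠ num := fun he => hnum_rest (he ▸ hvmem)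
          simp [hvne]
        have hle' : (rs ++ [num]).length ≤ n := by
          simp only [List.length_append, List.length_singleton] at hn ⊢
          omega
        have := ih (rs ++ [num]) hnd.of_cons hle' (fun h => absurd h hn)
        rw [hfeq] at this
        have hl : (rs ++ [num]).length = rs.length + 1 := by simp
        rw [this, hl]
        simp only [List.length_cons]
        omega

-- B's key count = |result| + |stack values outside result| (the distinct seen values)
lemma distinct_count (st rs : List Int) (d : PySem.Dict Int Int) (m : Nat)
    (h : PvInv st rs d m) :
    d.keys.length = rs.length + (st.filter (fun v => !rs.contains v)).length := by
  obtain ⟨hsn, hrn, hkn, _, hv⟩ := h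
  have hfn : (st.filter (fun v => !rs.contains v)).Nodup := hsn.filter _
  have hku : d.keys.toFinset.card = d.keys.length := List.toFinset_card_of_nodup hkn
  have hru : rs.toFinset.card = rs.length := List.toFinset_card_of_nodup hrn
  have hfu : (st.filter (fun v => !rs.contains v)).toFinset.card = (st.filter (fun v => !rs.contains v)).length :=
    List.toFinset_card_of_nodup hfn
  have hunion : d.keys.toFinset = rs.toFinset ∪ (st.filter (fun v => !rs.contains v)).toFinset := by
    ext v
    obtain ⟨⟨hc0, hc3⟩, hst, hrs, hky⟩ := hv v
    simp only [List.mem_toFinset, Finset.mem_union, List.mem_filter, Bool.not_eq_eq_eq_not,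
      Bool.not_true, List.contains_eq_mem, decide_eq_false_iff_not]
    rw [hky, hst, hrs]
    omega
  have hdisj : Disjoint rs.toFinset (st.filter (fun v => !rs.contains v)).toFinset := by
    rw [Finset.disjoint_left]
    intro v hvr hvf
    simp only [List.mem_toFinset, List.mem_filter, Bool.not_eq_eq_eq_not, Bool.not_true,
      List.contains_eq_mem, decide_eq_false_iff_not] at hvr hvf
    exact hvf.2 hvr
  rw [← hku, hunion, Finset.card_union_of_disjoint hdisj, hru, hfu]

-- ===== VERDICT (by name: the statement is the Claim_ definition above) =====
theorem solution_spec : Claim_equal_solution := by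
  intro A B S _hdom _hpre
  unfold Spec_solution solution solution_alt
  by_cases hgt : (A.length : Int) > S
  · rw [if_pos hgt, if_pos hgt]
  · rw [if_neg hgt, if_neg hgt]
    have hinv0 : PvInv [] [] PySem.Dict.empty 0 := by
      refine ⟨List.nodup_nil, List.nodup_nil, by rw [PySem.Dict.keys_empty]; exact List.nodup_nil, by simp, ?_⟩
      intro v
      rw [PySem.Dict.getD_empty, PySem.Dict.keys_empty]
      simp
    rcases loop_rel A B (PySem.List.pyRange 0 (A.length : Int) 1) [] [] PySem.Dict.empty 0 hinv0 with
      ⟨ha, hb⟩ | ⟨st, rs, d', ha, hb, hinv⟩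
    · rw [ha, hb]
    · rw [ha, hb]
      have hrange : (PySem.List.pyRange 0 (A.length : Int) 1).length = A.length := by
        rw [PySem.List.length_pyRange_one]
        simp
      rw [hrange] at hinv
      obtain ⟨hsn, hrn, hkn, hlen, hv⟩ := hinv
      have hle : rs.length ≤ A.length := by omega
      have hfull : rs.length = A.length → st.filter (fun v => !rs.contains v) = [] := by
        intro heq
        have : st.length = 0 := by omega
        rw [List.length_eq_zero_iff] at this
        rw [this]
        rfl
      have hfill := fill_len A.length st rs hsn hle hfull
      have hdc := distinct_count st rs d' (0 + 2 * A.length) ⟨hsn, hrn, hkn, hlen, hv⟩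
      have hsize : d'.size = d'.keys.length := by
        simp [PySem.Dict.size, PySem.Dict.keys]
      simp only [hfill, hsize, hdc, decide_eq_decide]
      omega
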